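-- pv_equiv track=rewrite | github.com/Zombiesama18/Leetcode_Python | Leetcode/Leetcode_LCP 33. 蓄水.py | storeWater
-- ===== SOURCE A (Python) =====
-- from typing import List
--
-- def storeWater(bucket: List[int], vat: List[int]) -> int:
--     num_poor = max(vat)
--     if num_poor == 0:
--         return 0
--     result = float('inf')
--     for k in range(1, num_poor + 1):
--         temp_result = 0
--         for b, v in zip(bucket, vat):
--             temp_result += max(0, (v + k - 1) // k - b)
--         result = min(result, temp_result + k)
--     return result
-- ===== SOURCE B (Python) =====
-- from typing import List
--
-- def storeWater(bucket: List[int], vat: List[int]) -> int: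
--     # Block sweep: ceil(v/k) is piecewise constant in k, and the total cost is
--     # (constant + k) inside each block, so only block-start values of k can be
--     # optimal.  Jump from block start to block start, and stop once k alone can
--     # no longer beat the best cost seen.
--     m = max(vat)
--     if m == 0:
--         return 0
--     pairs = list(zip(bucket, vat))
--     best = None
--     k = 1
--     while k <= m:
--         if best is not None and best <= k:
--             break
--         cost = k
--         nxt = m
--         for b, v in pairs:
--             q = (v + k - 1) // k
--             cost += max(0, q - b)
--             if q > 1:
--                 nxt = min(nxt, (v - 1) // (q - 1))
--         if best is None or cost < best:
--             best = cost
--         k = nxt + 1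
--     return best
-- ===== Notes on version B (the rewrite author's own statement) =====
-- stated objective: alternative
-- what changed: replaces A's scan over every k in 1..max(vat) by a divisor-block sweep that jumps directly between the values of k where some ceil(v/k) with v>k can change (inside a block the cost is constant-plus-k, so only block starts can be optimal), with an early break once k can no longer beat the best cost found; Pre_ excludes empty vat (A raises ValueError) and all-negative vat (A returns float('inf'), not an int)
-- outside the precondition, e.g. on storeWater([1], [-2]): A returns inf, B returns None; on storeWater([1], []): A raises ValueError, B raises ValueError
import Mathlib
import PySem

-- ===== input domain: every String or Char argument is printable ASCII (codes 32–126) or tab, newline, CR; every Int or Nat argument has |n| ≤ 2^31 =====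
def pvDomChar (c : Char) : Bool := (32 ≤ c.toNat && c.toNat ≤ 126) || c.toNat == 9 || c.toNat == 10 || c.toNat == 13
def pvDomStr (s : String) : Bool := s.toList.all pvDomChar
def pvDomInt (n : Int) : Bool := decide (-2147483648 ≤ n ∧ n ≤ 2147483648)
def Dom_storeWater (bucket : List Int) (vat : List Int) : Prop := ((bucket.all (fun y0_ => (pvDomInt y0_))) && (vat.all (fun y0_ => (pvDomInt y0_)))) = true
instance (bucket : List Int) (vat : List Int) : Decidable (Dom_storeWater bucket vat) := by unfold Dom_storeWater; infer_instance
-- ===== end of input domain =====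

-- B replaces A's scan over every k in 1..max(vat) by a divisor-block sweep that only
-- visits the values of k where the per-k cost can start a new block, with an early
-- break once k can no longer beat the best cost found (objective: alternative).

-- ===== PORT A =====
def storeWater (bucket : List Int) (vat : List Int) : Int :=
  match PySem.List.max? vat (fun x => x) with
  | none => 0        -- Python: max([]) raises ValueError; excluded by Pre_
  | some numPoor =>
    if numPoor = 0 then 0
    else
      ((PySem.List.pyRange 1 (numPoor + 1)).foldl
        (fun (result : Option Int) k =>
          let temp := (bucket.zip vat).foldl
            (fun acc bv => acc + max 0 (PySem.Int.floordiv (bv.2 + k - 1) k - bv.1)) 0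
          some (match result with | none => temp + k | some r => min r (temp + k)))
        none).getD 0
      -- result starts as float('inf') (= none); for numPoor ≥ 1 the range is nonempty,
      -- so the fold returns some r; the .getD 0 arm is only reached outside Pre_
      -- (numPoor < 0), where Python returns float('inf'), not an int.

-- ===== PORT B =====
-- the body of B's inner `for b, v in pairs` loop
def pvStepFn (k : Int) (cn : Int × Int) (bv : Int × Int) : Int × Int :=
  let q := PySem.Int.floordiv (bv.2 + k - 1) k
  let c := cn.1 + max 0 (q - bv.1)
  if 1 < q then (c, min cn.2 (PySem.Int.floordiv (bv.2 - 1) (q - 1))) else (c, cn.2)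

-- one inner pass over the pairs: accumulates (cost at k, largest k' of the block)
def altInner (k m : Int) (pairs : List (Int × Int)) : Int × Int :=
  pairs.foldl (pvStepFn k) (k, m)

def altLoop (pairs : List (Int × Int)) (m : Int) (k : Int) (best : Option Int) : Option Int :=
  if h : k ≤ m then
    if hbr : (match best with | some x => decide (x ≤ k) | none => false) = true then best
    else
      let cn := altInner k m pairs
      let best' : Option Int :=
        match best with
        | none => some cn.1
        | some r => if cn.1 < r then some cn.1 else some r
      -- `max (k+1)` only forces termination; pv_altInner_spec below shows k ≤ cn.2 on
      -- every reachable call (1 ≤ k), so this is exactly Python's `k = nxt + 1`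
      altLoop pairs m (max (k + 1) (cn.2 + 1)) best'
  else best
termination_by (m + 1 - k).toNat
decreasing_by simp_wf; omega

def storeWater_alt (bucket : List Int) (vat : List Int) : Int :=
  match PySem.List.max? vat (fun x => x) with
  | none => 0        -- Python: max([]) raises ValueError; excluded by Pre_
  | some m =>
    if m = 0 then 0
    else (altLoop (bucket.zip vat) m 1 none).getD 0

-- ===== PRECONDITION & SPEC =====
-- Pre_ excludes exactly: vat = [] (Python A raises ValueError on max([])) and
-- max(vat) < 0 (Python A returns float('inf'), not an int).
def Pre_storeWater (bucket : List Int) (vat : List Int) : Prop := ∃ x ∈ vat, 0 ≤ x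
instance (bucket : List Int) (vat : List Int) : Decidable (Pre_storeWater bucket vat) := by
  unfold Pre_storeWater; infer_instance

def pvWitness_storeWater : List Int × List Int := ([1, 2], [3, 4])

def Spec_storeWater (bucket : List Int) (vat : List Int) (out : Int) : Prop := out = storeWater_alt bucket vat
instance (bucket : List Int) (vat : List Int) (out : Int) : Decidable (Spec_storeWater bucket vat out) := by unfold Spec_storeWater; infer_instance

-- ===== CLAIM (what is proved, stated in full; the proofs are below) =====
def Claim_equal_storeWater : Prop := ∀ (bucket : List Int) (vat : List Int), Dom_storeWater bucket vat → Pre_storeWater bucket vat → Spec_storeWater bucket vat (storeWater bucket vat)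

-- ===== LEMMAS AND PROOFS =====

-- A's per-k cost: k plus the sum of bucket deficits (exactly A's inner loop plus k)
def pvCost (pairs : List (Int × Int)) (k : Int) : Int :=
  (pairs.foldl (fun acc bv => acc + max 0 (PySem.Int.floordiv (bv.2 + k - 1) k - bv.1)) 0) + k

-- the running-min step both programs use (`none` = Python's float('inf'))
def pvF (o : Option Int) (t : Int) : Option Int :=
  some (match o with | none => t | some r => min r t)

-- ceil(v/k), as A computes it
def pvCeil (v k : Int) : Int := PySem.Int.floordiv (v + k - 1) k

-- ## arithmetic lemmas about floordiv
theorem pv_fd_nonneg {a b : Int} (ha : 0 ≤ a) (hb : 0 < b) : 0 ≤ PySem.Int.floordiv a b := by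
  rw [PySem.Int.le_floordiv_iff_mul_le hb]; omega

theorem pv_fd_antitone {a k j : Int} (ha : 0 ≤ a) (hk : 0 < k) (hkj : k ≤ j) :
    PySem.Int.floordiv a j ≤ PySem.Int.floordiv a k := by
  have hj : 0 < j := lt_of_lt_of_le hk hkj
  have h1 : PySem.Int.floordiv a j * j ≤ a := by
    rw [← PySem.Int.le_floordiv_iff_mul_le hj]
  have h0 : 0 ≤ PySem.Int.floordiv a j := pv_fd_nonneg ha hj
  rw [PySem.Int.le_floordiv_iff_mul_le hk]
  nlinarith

theorem pv_fd_block {a k j : Int} (ha : 0 ≤ a) (hk : 0 < k) (hkj : k ≤ j)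
    (hd : 1 ≤ PySem.Int.floordiv a k)
    (hj : j ≤ PySem.Int.floordiv a (PySem.Int.floordiv a k)) :
    PySem.Int.floordiv a j = PySem.Int.floordiv a k := by
  have hdpos : 0 < PySem.Int.floordiv a k := hd
  have h1 : j * PySem.Int.floordiv a k ≤ a := by
    rw [← PySem.Int.le_floordiv_iff_mul_le hdpos]; exact hj
  have h2 : PySem.Int.floordiv a k ≤ PySem.Int.floordiv a j := by
    have hjpos : 0 < j := lt_of_lt_of_le hk hkj
    rw [PySem.Int.le_floordiv_iff_mul_le hjpos]; linarith [h1]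
  have h3 := pv_fd_antitone ha hk hkj
  omega

theorem pv_fd_zero {a b : Int} (ha : 0 ≤ a) (hab : a < b) : PySem.Int.floordiv a b = 0 := by
  have hb : 0 < b := lt_of_le_of_lt ha hab
  rw [PySem.Int.floordiv_eq_iff_of_pos hb]; constructor <;> omega

theorem pv_fd_blockstart_ge {a k : Int} (ha : 0 ≤ a) (hk : 0 < k)
    (hd : 1 ≤ PySem.Int.floordiv a k) :
    k ≤ PySem.Int.floordiv a (PySem.Int.floordiv a k) := by
  have h1 : PySem.Int.floordiv a k * k ≤ a := by
    rw [← PySem.Int.le_floordiv_iff_mul_le hk]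
  rw [PySem.Int.le_floordiv_iff_mul_le hd]
  linarith

-- ceil(v/k) = -((-v) // k)
theorem pv_ceil_neg (v : Int) {k : Int} (hk : 0 < k) :
    pvCeil v k = -(PySem.Int.floordiv (-v) k) := by
  have h := (PySem.Int.floordiv_eq_iff_of_pos (a := v + k - 1) (q := pvCeil v k) hk).mp rfl
  symm
  rw [show -(PySem.Int.floordiv (-v) k) = -PySem.Int.floordiv (-v) k from rfl,
    PySem.Int.neg_floordiv_neg_eq_iff_of_pos hk]
  constructor <;> nlinarith [h.1, h.2]

-- ceil(v/k) - 1 = (v-1) // k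
theorem pv_ceil_sub_one (v : Int) {k : Int} (hk : 0 < k) :
    PySem.Int.floordiv (v - 1) k = pvCeil v k - 1 := by
  have h := (PySem.Int.floordiv_eq_iff_of_pos (a := v + k - 1) (q := pvCeil v k) hk).mp rfl
  rw [PySem.Int.floordiv_eq_iff_of_pos hk]
  constructor <;> nlinarith [h.1, h.2]

theorem pv_ceil_zero {k : Int} (hk : 0 < k) : pvCeil 0 k = 0 := by
  unfold pvCeil
  have : (0 : Int) + k - 1 = k - 1 := by ring
  rw [this]; exact pv_fd_zero (by omega) (by omega)

-- ## the inner pass of B: cost component and block component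
theorem pv_foldl_add (g : Int × Int → Int) :
    ∀ (l : List (Int × Int)) (c : Int),
      l.foldl (fun acc bv => acc + g bv) c = c + (l.map g).sum := by
  intro l
  induction l with
  | nil => intro c; simp
  | cons a t ih => intro c; simp [List.foldl_cons, ih]; ring

theorem pv_cost_eq_sum (pairs : List (Int × Int)) (k : Int) :
    pvCost pairs k = (pairs.map (fun bv => max 0 (pvCeil bv.2 k - bv.1))).sum + k := by
  unfold pvCost
  rw [pv_foldl_add (fun bv => max 0 (PySem.Int.floordiv (bv.2 + k - 1) k - bv.1)) pairs 0]
  simp [pvCeil]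

theorem pv_cost_ge (pairs : List (Int × Int)) (k : Int) : k ≤ pvCost pairs k := by
  rw [pv_cost_eq_sum]
  have : 0 ≤ (pairs.map (fun bv => max 0 (pvCeil bv.2 k - bv.1))).sum :=
    List.sum_nonneg (by intro x hx; simp at hx; obtain ⟨a, b, _, rfl⟩ := hx; positivity)
  omega

-- the single-pair step of altInner's fold: records the cost term at k and keeps an
-- upper bound n1 up to which every per-pair ceiling is ≥ its value at k
theorem pv_step_spec (k : Int) (hk : 1 ≤ k) (b v c0 n0 : Int) (hn0 : k ≤ n0) :
    ∃ n1 : Int,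
      pvStepFn k (c0, n0) (b, v) = (c0 + max 0 (pvCeil v k - b), n1)
      ∧ k ≤ n1 ∧ n1 ≤ n0
      ∧ (∀ j, k ≤ j → j ≤ n1 → pvCeil v k ≤ pvCeil v j) := by
  have hk0 : (0 : Int) < k := hk
  have hq : PySem.Int.floordiv (v + k - 1) k = pvCeil v k := rfl
  by_cases hq1 : 1 < pvCeil v k
  · -- a real block: q ≥ 2 forces v ≥ 2, and (v-1)//(q-1) ends the block
    have hb := (PySem.Int.floordiv_eq_iff_of_pos (a := v + k - 1) (q := pvCeil v k) hk0).mp rfl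
    have hv2 : 2 ≤ v := by nlinarith [hb.1, hb.2]
    have ha : (0 : Int) ≤ v - 1 := by omega
    have hsub := pv_ceil_sub_one v hk0
    have hd1 : 1 ≤ PySem.Int.floordiv (v - 1) k := by omega
    refine ⟨min n0 (PySem.Int.floordiv (v - 1) (pvCeil v k - 1)), ?_, ?_, ?_, ?_⟩
    · simp only [pvStepFn, hq, if_pos hq1]
    · have := pv_fd_blockstart_ge ha hk0 hd1
      rw [hsub] at this
      omega
    · omega
    · intro j hkj hjn
      have hj1 : (0 : Int) < j := by omega
      have hblock : PySem.Int.floordiv (v - 1) j = PySem.Int.floordiv (v - 1) k := by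
        apply pv_fd_block ha hk0 hkj hd1
        rw [hsub]; omega
      have := pv_ceil_sub_one v hj1
      omega
  · -- q ≤ 1: the ceiling can only grow (stay at 1 or 0, or rise towards 0 for v < 0)
    refine ⟨n0, ?_, hn0, le_refl _, ?_⟩
    · simp only [pvStepFn, hq, if_neg hq1]
    · intro j hkj _
      have hj1 : (0 : Int) < j := by omega
      by_cases hv : 0 < v
      · have ha : (0 : Int) ≤ v - 1 := by omega
        have h1 := pv_ceil_sub_one v hj1
        have h2 := pv_ceil_sub_one v hk0
        have h4 := pv_fd_nonneg ha hj1 (a := v - 1)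
        omega
      · by_cases hv2 : v < 0
        · have hw : (0 : Int) ≤ -v := by omega
          rw [pv_ceil_neg v hk0, pv_ceil_neg v hj1]
          have := pv_fd_antitone hw hk0 hkj (a := -v)
          omega
        · have hv0 : v = 0 := by omega
          subst hv0
          rw [pv_ceil_zero hj1, pv_ceil_zero hk0]

theorem pv_altInner_spec (k : Int) (hk : 1 ≤ k) :
    ∀ (pairs : List (Int × Int)) (c0 n0 : Int), k ≤ n0 →
      (pairs.foldl (pvStepFn k) (c0, n0)).1
        = c0 + (pairs.map (fun bv => max 0 (pvCeil bv.2 k - bv.1))).sum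
      ∧ k ≤ (pairs.foldl (pvStepFn k) (c0, n0)).2
      ∧ (pairs.foldl (pvStepFn k) (c0, n0)).2 ≤ n0
      ∧ (∀ j, k ≤ j → j ≤ (pairs.foldl (pvStepFn k) (c0, n0)).2 →
          ∀ bv ∈ pairs, pvCeil bv.2 k ≤ pvCeil bv.2 j) := by
  intro pairs
  induction pairs with
  | nil =>
    intro c0 n0 hn0
    refine ⟨by simp, hn0, le_refl _, by simp⟩
  | cons hd tl ih =>
    intro c0 n0 hn0
    obtain ⟨n1, hstep, hkn1, hn1n0, hmono⟩ := pv_step_spec k hk hd.1 hd.2 c0 n0 hn0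
    have hstep' : pvStepFn k (c0, n0) hd = (c0 + max 0 (pvCeil hd.2 k - hd.1), n1) := by
      rw [← hstep]
    obtain ⟨ih1, ih2, ih3, ih4⟩ := ih (c0 + max 0 (pvCeil hd.2 k - hd.1)) n1 hkn1
    simp only [List.foldl_cons, hstep']
    refine ⟨by rw [ih1]; simp; ring, ih2, le_trans ih3 hn1n0, ?_⟩
    intro j hkj hjr bv hbv
    rcases List.mem_cons.mp hbv with h | h
    · subst h
      exact hmono j hkj (le_trans hjr ih3)
    · exact ih4 j hkj hjr bv h

-- folding pvF over values all ≥ x leaves `some x` unchanged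
theorem pv_fold_F_stay (g : Int → Int) :
    ∀ (l : List Int) (x : Int), (∀ j ∈ l, x ≤ g j) →
      l.foldl (fun o j => pvF o (g j)) (some x) = some x := by
  intro l
  induction l with
  | nil => intro x _; rfl
  | cons a t ih =>
    intro x h
    have hx : x ≤ g a := h a (by simp)
    simp only [List.foldl_cons]
    have : pvF (some x) (g a) = some x := by simp [pvF, min_eq_left hx]
    rw [this]
    exact ih x (fun j hj => h j (by simp [hj]))

theorem pv_altLoop_eq (pairs : List (Int × Int)) (m : Int) :
    ∀ (n : Nat) (k : Int) (best : Option Int), (m + 1 - k).toNat = n → 1 ≤ k →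
      altLoop pairs m k best
        = (PySem.List.pyRange k (m + 1)).foldl (fun o j => pvF o (pvCost pairs j)) best := by
  intro n
  induction n using Nat.strong_induction_on with
  | _ n ih =>
    intro k best hn hk
    rw [altLoop.eq_def]
    by_cases hkm : k ≤ m
    · rw [dif_pos hkm]
      by_cases hbr : (match best with | some x => decide (x ≤ k) | none => false) = true
      · rw [dif_pos hbr]
        cases best with
        | none => simp at hbr
        | some x =>
          have hx : x ≤ k := by simpa using hbr
          symm
          apply pv_fold_F_stay
          intro j hj
          have hj' := (PySem.List.mem_pyRange_one.mp hj).1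
          have := pv_cost_ge pairs j
          omega
      · rw [dif_neg hbr]
        obtain ⟨h1, h2, h3, h4⟩ := pv_altInner_spec k hk pairs k m hkm
        have h4' : ∀ j, k ≤ j → j ≤ (altInner k m pairs).2 →
            ∀ bv ∈ pairs, pvCeil bv.2 k ≤ pvCeil bv.2 j := h4
        have hc : (altInner k m pairs).1 = pvCost pairs k := by
          rw [show altInner k m pairs = pairs.foldl (pvStepFn k) (k, m) from rfl, h1,
            pv_cost_eq_sum]
          ring
        have h2' : k ≤ (altInner k m pairs).2 := h2
        have h3' : (altInner k m pairs).2 ≤ m := h3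
        have hmax : max (k + 1) ((altInner k m pairs).2 + 1) = (altInner k m pairs).2 + 1 := by
          omega
        have main : altLoop pairs m (max (k + 1) ((altInner k m pairs).2 + 1))
            (pvF best (pvCost pairs k))
            = (PySem.List.pyRange k (m + 1)).foldl
                (fun o j => pvF o (pvCost pairs j)) best := by
          rw [hmax]
          have hdec : (m + 1 - ((altInner k m pairs).2 + 1)).toNat < n := by omega
          rw [ih _ hdec ((altInner k m pairs).2 + 1) (pvF best (pvCost pairs k)) rfl (by omega)]
          -- split the range at the end of the block
          rw [PySem.List.pyRange_one_append k ((altInner k m pairs).2 + 1) (m + 1)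
            (by omega) (by omega), List.foldl_append]
          congr 1
          -- fold over the block [k, nxt] collapses to the single update at k
          rw [PySem.List.pyRange_one_cons (by omega : k < (altInner k m pairs).2 + 1)]
          simp only [List.foldl_cons]
          -- the accumulator after k is some y with y ≤ pvCost pairs k
          obtain ⟨y, hy, hyle⟩ : ∃ y, pvF best (pvCost pairs k) = some y ∧ y ≤ pvCost pairs k := by
            cases best with
            | none => exact ⟨pvCost pairs k, rfl, le_refl _⟩
            | some r => exact ⟨min r (pvCost pairs k), rfl, min_le_right _ _⟩
          rw [hy]
          symm
          apply pv_fold_F_stay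
          intro j hj
          obtain ⟨hj1, hj2⟩ := PySem.List.mem_pyRange_one.mp hj
          show y ≤ pvCost pairs j
          -- inside the block the cost can only grow: every ceiling is ≥ its value at k
          have hcj : pvCost pairs k - k + j ≤ pvCost pairs j := by
            rw [pv_cost_eq_sum, pv_cost_eq_sum]
            have hs : (pairs.map (fun bv => max 0 (pvCeil bv.2 k - bv.1))).sum
                ≤ (pairs.map (fun bv => max 0 (pvCeil bv.2 j - bv.1))).sum := by
              apply List.sum_le_sum
              intro bv hbv
              have := h4' j (by omega) (by omega) bv hbv
              omega
            omega
          omega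
        cases best with
        | none =>
          have : some (altInner k m pairs).1 = pvF none (pvCost pairs k) := by
            simp [pvF, hc]
          rw [show (have cn := altInner k m pairs;
              have best' : Option Int := some cn.1;
              altLoop pairs m (max (k + 1) (cn.2 + 1)) best')
              = altLoop pairs m (max (k + 1) ((altInner k m pairs).2 + 1))
                  (some (altInner k m pairs).1) from rfl, this]
          exact main
        | some r =>
          have : (if (altInner k m pairs).1 < r then some (altInner k m pairs).1 else some r)
              = pvF (some r) (pvCost pairs k) := by
            simp only [pvF, hc]
            rcases lt_or_ge (pvCost pairs k) r with h | h
            · rw [if_pos h]; simp [min_eq_right (le_of_lt h)]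
            · rw [if_neg (not_lt.mpr h)]; simp [min_eq_left h]
          rw [show (have cn := altInner k m pairs;
              have best' : Option Int := if cn.1 < r then some cn.1 else some r;
              altLoop pairs m (max (k + 1) (cn.2 + 1)) best')
              = altLoop pairs m (max (k + 1) ((altInner k m pairs).2 + 1))
                  (if (altInner k m pairs).1 < r then some (altInner k m pairs).1 else some r)
              from rfl, this]
          exact main
    · rw [dif_neg hkm]
      rw [PySem.List.pyRange_one_eq_nil (by omega : m + 1 ≤ k)]
      rfl

-- ===== VERDICT (by name: the statement is the Claim_ definition above) =====
theorem storeWater_spec : Claim_equal_storeWater := by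
  intro bucket vat _ hpre
  obtain ⟨x, hx, hx0⟩ := hpre
  show storeWater bucket vat = storeWater_alt bucket vat
  unfold storeWater storeWater_alt
  cases hmax : PySem.List.max? vat (fun x => x) with
  | none =>
    exact absurd ((PySem.List.max?_eq_none_iff vat (fun x => x)).mp hmax)
      (by intro h; subst h; simp at hx)
  | some m =>
    have hm0 : (0 : Int) ≤ m := le_trans hx0 (PySem.List.max?_isMax hmax x hx)
    by_cases hm : m = 0
    · simp [hm]
    · have hm1 : (1 : Int) ≤ m := by omega
      simp only [if_neg hm]
      rw [pv_altLoop_eq (bucket.zip vat) m (m + 1 - 1).toNat 1 none rfl (le_refl 1)]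
      have hfn : (fun (result : Option Int) k =>
          let temp := (bucket.zip vat).foldl
            (fun acc bv => acc + max 0 (PySem.Int.floordiv (bv.2 + k - 1) k - bv.1)) 0
          some (match result with | none => temp + k | some r => min r (temp + k)))
          = fun o j => pvF o (pvCost (bucket.zip vat) j) := by
        funext o j
        cases o <;> rfl
      rw [hfn]
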